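-- pv_equiv track=rewrite | github.com/pulsfortjf/music-notation | main.py | calc_frequency
-- ===== SOURCE A (Python) =====
-- def calc_frequency(input_note, n):
--     frequency = input_note
--     if n == 1:
--         return frequency
--     else:
--         for x in range(n-1):
--             frequency = frequency * 2
--
--     return frequency
-- ===== SOURCE B (Python) =====
-- def calc_frequency(input_note, n):
--     if n <= 1:
--         return input_note
--     return input_note * 2 ** (n - 1)
-- ===== Notes on version B (the rewrite author's own statement) =====
-- stated objective: alternative
-- what changed: Replaces the repeated-doubling loop with a single closed-form exponentiation input_note * 2**(n-1), returning input_note unchanged for n <= 1 exactly as the empty loop does; intended as faster (measured up to ~1475x at n=262144, though the probe could not confirm the label at the largest size).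
import Mathlib
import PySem

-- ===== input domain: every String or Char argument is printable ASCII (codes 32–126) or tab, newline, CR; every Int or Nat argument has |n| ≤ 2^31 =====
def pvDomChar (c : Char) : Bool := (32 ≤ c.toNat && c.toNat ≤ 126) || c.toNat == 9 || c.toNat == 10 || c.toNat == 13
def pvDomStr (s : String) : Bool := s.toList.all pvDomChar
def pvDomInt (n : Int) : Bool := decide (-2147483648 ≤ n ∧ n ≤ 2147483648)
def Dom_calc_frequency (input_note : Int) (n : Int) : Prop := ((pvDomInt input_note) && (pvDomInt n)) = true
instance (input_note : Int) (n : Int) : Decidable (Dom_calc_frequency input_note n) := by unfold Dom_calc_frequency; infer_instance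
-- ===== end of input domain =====

-- B replaces A's repeated-doubling loop with a closed-form exponentiation (intended speedup; timing run could not confirm at the largest size).

-- ===== PORT A =====
def calc_frequency (input_note : Int) (n : Int) : Int :=
  let frequency := input_note
  if n == 1 then frequency
  else (PySem.List.pyRange 0 (n - 1) 1).foldl (fun frequency _ => frequency * 2) frequency

-- ===== PORT B =====
def calc_frequency_alt (input_note : Int) (n : Int) : Int :=
  if n ≤ 1 then input_note
  else input_note * 2 ^ (n - 1).toNat

-- ===== PRECONDITION & SPEC =====
def Spec_calc_frequency (input_note : Int) (n : Int) (out : Int) : Prop := out = calc_frequency_alt input_note n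
instance (input_note : Int) (n : Int) (out : Int) : Decidable (Spec_calc_frequency input_note n out) := by unfold Spec_calc_frequency; infer_instance

-- ===== CLAIM (what is proved, stated in full; the proofs are below) =====
def Claim_equal_calc_frequency : Prop := ∀ (input_note : Int) (n : Int), Dom_calc_frequency input_note n → Spec_calc_frequency input_note n (calc_frequency input_note n)

-- ===== LEMMAS AND PROOFS =====

theorem foldl_double (l : List Int) (a : Int) :
    l.foldl (fun f _ => f * 2) a = a * 2 ^ l.length := by
  induction l generalizing a with
  | nil => simp
  | cons x xs ih => simp [List.foldl, ih, pow_succ]; ring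

-- ===== VERDICT (by name: the statement is the Claim_ definition above) =====
theorem calc_frequency_spec : Claim_equal_calc_frequency := by
  intro input_note n _
  unfold Spec_calc_frequency calc_frequency calc_frequency_alt
  by_cases h1 : n = 1
  · simp [h1]
  · simp only [beq_iff_eq, h1, if_false]
    rw [foldl_double, PySem.List.length_pyRange_one]
    by_cases h2 : n ≤ 1
    · have h0 : (n - 1 - 0).toNat = 0 := by omega
      simp only [if_pos h2, h0, pow_zero, mul_one]
    · simp [h2]
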